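-- pv_equiv track=rewrite | github.com/gottingerfrank/python | iter_squareadd.py | iterSquareAdd
-- ===== SOURCE A (Python) =====
-- def iterSquareAdd(x):
--     squared=0
--     X=x
--     if x==0:
--         squared=1
--     else:
--         while X!=0:
--             squared+=x
--             X-=1
--     return squared
-- ===== SOURCE B (Python) =====
-- def iterSquareAdd(x):
--     return x * x
-- ===== Notes on version B (the rewrite author's own statement) =====
-- stated objective: faster
-- what changed: Replaces the O(x) repeated-addition loop with the closed-form multiplication x*x.
-- intended difference: On input zero A returns one (its special case sets squared to one) while B returns zero, the correct square of zero. — e.g. on iterSquareAdd(0): A returns 1, B returns 0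
import Mathlib
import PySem

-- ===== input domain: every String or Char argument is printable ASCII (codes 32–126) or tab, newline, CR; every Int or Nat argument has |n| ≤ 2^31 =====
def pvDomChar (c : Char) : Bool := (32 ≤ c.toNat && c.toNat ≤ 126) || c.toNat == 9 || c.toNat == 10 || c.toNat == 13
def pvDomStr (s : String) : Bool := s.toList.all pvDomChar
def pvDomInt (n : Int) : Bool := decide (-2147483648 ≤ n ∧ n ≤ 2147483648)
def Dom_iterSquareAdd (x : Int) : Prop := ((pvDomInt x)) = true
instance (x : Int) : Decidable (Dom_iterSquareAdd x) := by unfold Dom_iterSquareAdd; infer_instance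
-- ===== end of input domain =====

-- B replaces the repeated-addition loop with direct multiplication (O(1) vs O(x));
-- at input zero B returns the intended value zero where A returns one (see D_ below).

-- ===== PORT A =====
-- the 'while X != 0: squared += x; X -= 1' loop; recursion on the countdown X
-- measured as a Nat (exact for X ≥ 0; for x < 0 the Python loop diverges, excluded by Pre_).
def iterSquareAddLoop (x : Int) : Nat → Int → Int
  | 0, squared => squared
  | n + 1, squared => iterSquareAddLoop x n (squared + x)

def iterSquareAdd (x : Int) : Int :=
  if x = 0 then 1 else iterSquareAddLoop x x.toNat 0

-- ===== PORT B =====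
def iterSquareAdd_alt (x : Int) : Int := x * x

-- ===== PRECONDITION & SPEC =====
-- Pre_ excludes x < 0, where A's while loop never terminates (X only moves away from 0).
def Pre_iterSquareAdd (x : Int) : Prop := 0 ≤ x
instance (x : Int) : Decidable (Pre_iterSquareAdd x) := by unfold Pre_iterSquareAdd; infer_instance
def pvWitness_iterSquareAdd : Int := (3)

-- On input zero A returns one (its special case sets squared to one) while B returns zero, the correct square of zero.
def D_iterSquareAdd (x : Int) : Prop := x = 0
instance (x : Int) : Decidable (D_iterSquareAdd x) := by unfold D_iterSquareAdd; infer_instance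
def Spec_iterSquareAdd (x : Int) (out : Int) : Prop := ¬ D_iterSquareAdd x → out = iterSquareAdd_alt x
instance (x : Int) (out : Int) : Decidable (Spec_iterSquareAdd x out) := by unfold Spec_iterSquareAdd; infer_instance
def pvDiffWitness_iterSquareAdd : Int := (0)
def pvDiffWitnessOut_iterSquareAdd : Int × Int := (1, 0)

-- ===== CLAIM (what is proved, stated in full; the proofs are below) =====
def Claim_unchanged_iterSquareAdd : Prop := ∀ (x : Int), Dom_iterSquareAdd x → Pre_iterSquareAdd x → Spec_iterSquareAdd x (iterSquareAdd x)
def Claim_changed_iterSquareAdd : Prop := Dom_iterSquareAdd (pvDiffWitness_iterSquareAdd) ∧ Pre_iterSquareAdd (pvDiffWitness_iterSquareAdd) ∧ D_iterSquareAdd (pvDiffWitness_iterSquareAdd) ∧ iterSquareAdd (pvDiffWitness_iterSquareAdd) = pvDiffWitnessOut_iterSquareAdd.1 ∧ iterSquareAdd_alt (pvDiffWitness_iterSquareAdd) = pvDiffWitnessOut_iterSquareAdd.2 ∧ pvDiffWitnessOut_iterSquareAdd.1 ≠ pvDiffWitnessOut_iterSquareAdd.2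
def Claim_exact_iterSquareAdd : Prop := ∀ (x : Int), Dom_iterSquareAdd x → Pre_iterSquareAdd x → D_iterSquareAdd x → iterSquareAdd x ≠ iterSquareAdd_alt x

-- ===== LEMMAS AND PROOFS =====
theorem iterSquareAddLoop_eq (x : Int) (n : Nat) (s : Int) :
    iterSquareAddLoop x n s = s + n * x := by
  induction n generalizing s with
  | zero => simp [iterSquareAddLoop]
  | succ m ih =>
    simp [iterSquareAddLoop, ih]
    ring

-- ===== VERDICT (by name: the statement is the Claim_ definition above) =====
theorem iterSquareAdd_spec : Claim_unchanged_iterSquareAdd := by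
  intro x _ hpre hd
  have hx : x ≠ 0 := hd
  simp [iterSquareAdd, iterSquareAdd_alt, hx, iterSquareAddLoop_eq]
  exact hpre

theorem iterSquareAdd_changed : Claim_changed_iterSquareAdd := by
  unfold Claim_changed_iterSquareAdd; decide

theorem iterSquareAdd_tight : Claim_exact_iterSquareAdd := by
  intro x _ _ hd
  subst hd
  decide
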